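-- pv_equiv track=rewrite | github.com/eun61n00/Algorithm | String/boj_20437.py | boj_20437
-- ===== SOURCE A (Python) =====
-- from collections import defaultdict
--
-- def boj_20437(string, k):
--
--     character_idx = defaultdict(list)
--
--     min = 100000
--     max = 0
--
--     for i in range(len(string)):
--         if string.count(string[i]) >= k:
--             character_idx[string[i]].append(i)
--
--     for ch in character_idx:
--         lst = character_idx[ch]
--         for i in range(len(lst) - k + 1):
--             cnt = lst[i + k - 1] - lst[i] + 1
--             if cnt < min:
--                 min = cnt
--             if cnt > max:
--                 max = cnt
--
--     if (min == 100000 and max == 0):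
--         return (-1,)
--     else:
--         return (min, max)
-- ===== SOURCE B (Python) =====
-- def boj_20437(string, k):
--     occ = {}
--     mn, mx = 100000, 0
--     for i, c in enumerate(string):
--         q = occ.setdefault(c, [])
--         q.append(i)
--         if len(q) > k:
--             q.pop(0)
--         if len(q) == k:
--             span = i - q[0] + 1
--             if span < mn:
--                 mn = span
--             if span > mx:
--                 mx = span
--     if mn == 100000 and mx == 0:
--         return (-1,)
--     return (mn, mx)
-- ===== Notes on version B (the rewrite author's own statement) =====
-- stated objective: faster
-- what changed: A makes two staged passes (an O(n) substring-count test at every position to build full per-character index lists, then a rescan of each list with an indexed window loop); B is one streaming pass over enumerate(string) that keeps, per character, only a bounded queue of its last k indices and updates min/max online the moment a k-th occurrence arrives, so no index list is ever rescanned.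
import Mathlib
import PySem

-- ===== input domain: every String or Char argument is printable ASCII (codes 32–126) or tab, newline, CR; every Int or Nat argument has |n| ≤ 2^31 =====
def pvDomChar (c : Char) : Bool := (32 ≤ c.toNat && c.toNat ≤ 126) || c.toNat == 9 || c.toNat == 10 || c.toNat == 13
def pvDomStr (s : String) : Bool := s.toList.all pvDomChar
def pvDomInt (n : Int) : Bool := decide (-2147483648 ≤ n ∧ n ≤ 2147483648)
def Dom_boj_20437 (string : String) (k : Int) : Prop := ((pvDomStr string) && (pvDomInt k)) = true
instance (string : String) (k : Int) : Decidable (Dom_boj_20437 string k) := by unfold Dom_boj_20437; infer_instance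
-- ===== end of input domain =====

-- B replaces A's two staged passes (a per-position O(n) count test building full per-character
-- index lists, then a window rescan of each list) by one streaming pass that keeps only the last
-- k indices of each character and updates min/max online (objective: faster).

-- ===== PORT A =====
def boj_20437 (string : String) (k : Int) : List Int :=
  let cs := string.toList
  let d : PySem.Dict Char (List Int) :=
    (PySem.List.pyRange 0 (cs.length : Int) 1).foldl
      (fun d i =>
        let c := PySem.List.pyGetD cs i ' '
        if k ≤ (PySem.Chars.count cs [c] : Int) then
          d.modify c [] (· ++ [i])
        else d)
      PySem.Dict.empty
  let p := d.keys.foldl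
    (fun (p : Int × Int) ch =>
      let lst := d.getD ch []
      (PySem.List.pyRange 0 ((lst.length : Int) - k + 1) 1).foldl
        (fun (q : Int × Int) i =>
          let cnt := PySem.List.pyGetD lst (i + k - 1) 0 - PySem.List.pyGetD lst i 0 + 1
          let mn := if cnt < q.1 then cnt else q.1
          let mx := if q.2 < cnt then cnt else q.2
          (mn, mx)) p)
    (100000, 0)
  if p.1 = 100000 ∧ p.2 = 0 then [-1] else [p.1, p.2]

-- ===== PORT B =====
def boj_20437_alt (string : String) (k : Int) : List Int :=
  let cs := string.toList
  let st := (PySem.List.enumerate cs 0).foldl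
    (fun (st : PySem.Dict Char (List Int) × Int × Int) p =>
      let q0 := st.1.getD p.2 [] ++ [p.1]                        -- q = occ.setdefault(c, []); q.append(i)
      let q := if k < (q0.length : Int) then q0.drop 1 else q0   -- if len(q) > k: q.pop(0)
      let d := st.1.insert p.2 q
      if (q.length : Int) = k then
        let span := p.1 - q.headD 0 + 1                          -- i - q[0] + 1 (q has length k ≥ 1 under Pre_)
        (d, if span < st.2.1 then span else st.2.1, if st.2.2 < span then span else st.2.2)
      else (d, st.2.1, st.2.2))
    (PySem.Dict.empty, 100000, 0)
  if st.2.1 = 100000 ∧ st.2.2 = 0 then [-1] else [st.2.1, st.2.2]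

-- ===== PRECONDITION & SPEC =====
-- Pre_ excludes k ≤ 0 with a nonempty string: there A's inner loop indexes past the end of an
-- index list and raises IndexError (and B raises too at k = 0).
def Pre_boj_20437 (string : String) (k : Int) : Prop := 1 ≤ k ∨ string = ""
instance (string : String) (k : Int) : Decidable (Pre_boj_20437 string k) := by
  unfold Pre_boj_20437; infer_instance
def pvWitness_boj_20437 : String × Int := ("banana", 2)

def Spec_boj_20437 (string : String) (k : Int) (out : List Int) : Prop := out = boj_20437_alt string k
instance (string : String) (k : Int) (out : List Int) : Decidable (Spec_boj_20437 string k out) := by unfold Spec_boj_20437; infer_instance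

-- ===== CLAIM (what is proved, stated in full; the proofs are below) =====
def Claim_equal_boj_20437 : Prop := ∀ (string : String) (k : Int), Dom_boj_20437 string k → Pre_boj_20437 string k → Spec_boj_20437 string k (boj_20437 string k)

-- ===== LEMMAS AND PROOFS =====

-- the update of (min, max) by one window span, shared by both programs
def pvStep (q : Int × Int) (cnt : Int) : Int × Int :=
  (if cnt < q.1 then cnt else q.1, if q.2 < cnt then cnt else q.2)

-- the list of indices of character c in cs (B's per-character occurrence list, in order)
def pvProj (L : List (Int × Char)) (c : Char) : List Int :=
  L.filterMap (fun q => if q.2 = c then some q.1 else none)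
def pvIdx (cs : List Char) (c : Char) : List Int := pvProj (PySem.List.enumerate cs 0) c

-- A's qualifying test: the character occurs at least k times
def pvQ (cs : List Char) (k : Int) (c : Char) : Bool := decide (k ≤ (cs.count c : Int))

-- A's first loop (the dict of index lists)
def pvDictA (cs : List Char) (k : Int) : PySem.Dict Char (List Int) :=
  (PySem.List.pyRange 0 (cs.length : Int) 1).foldl
    (fun d i =>
      let c := PySem.List.pyGetD cs i ' '
      if k ≤ (PySem.Chars.count cs [c] : Int) then d.modify c [] (· ++ [i]) else d)
    PySem.Dict.empty

-- A's inner loop over one index list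
def pvInnerA (k : Int) (lst : List Int) (p : Int × Int) : Int × Int :=
  (PySem.List.pyRange 0 ((lst.length : Int) - k + 1) 1).foldl
    (fun q i => pvStep q (PySem.List.pyGetD lst (i + k - 1) 0 - PySem.List.pyGetD lst i 0 + 1)) p

-- the spans of all k-windows of lst, by left endpoint
def pvWin (k : Nat) (l : List Int) : List Int :=
  (List.range (l.length + 1 - k)).map (fun j => l.getD (j + k - 1) 0 - l.getD j 0 + 1)

-- the spans of the k-windows of t ++ e whose right endpoint lies in e
def pvWinExt (k : Nat) (t : List Int) : List Int → List Int
  | [] => []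
  | x :: e => (if k ≤ t.length + 1 then [x - (t ++ [x]).getD (t.length + 1 - k) 0 + 1] else [])
      ++ pvWinExt k (t ++ [x]) e

-- the last k elements (B's bounded queue)
def pvLastK (k : Nat) (l : List Int) : List Int := l.drop (l.length - k)

def pvUpd (h : Char → List Int) (c : Char) (i : Int) : Char → List Int :=
  fun d => if d = c then h d ++ [i] else h d

-- the (char, span) pairs B's streaming pass produces, in stream order, starting from history h
def pvSpanP (k : Nat) : (Char → List Int) → List (Int × Char) → List (Char × Int)
  | _, [] => []
  | h, (i, c) :: L =>
      (if k ≤ (h c).length + 1 then [(c, i - (h c ++ [i]).getD ((h c).length + 1 - k) 0 + 1)] else [])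
      ++ pvSpanP k (pvUpd h c i) L

-- B's loop body
def pvStepB (k : Int) (st : PySem.Dict Char (List Int) × Int × Int) (p : Int × Char) :
    PySem.Dict Char (List Int) × Int × Int :=
  let q0 := st.1.getD p.2 [] ++ [p.1]
  let q := if k < (q0.length : Int) then q0.drop 1 else q0
  let d := st.1.insert p.2 q
  if (q.length : Int) = k then (d, pvStep st.2 (p.1 - q.headD 0 + 1)) else (d, st.2)

theorem portA_eq (string : String) (k : Int) :
    boj_20437 string k =
      (let cs := string.toList
       let pr := (pvDictA cs k).keys.foldl
         (fun p ch => pvInnerA k ((pvDictA cs k).getD ch []) p) (100000, 0)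
       if pr.1 = 100000 ∧ pr.2 = 0 then [-1] else [pr.1, pr.2]) := rfl

theorem portB_eq (string : String) (k : Int) :
    boj_20437_alt string k =
      (let st := (PySem.List.enumerate string.toList 0).foldl (pvStepB k)
         (PySem.Dict.empty, 100000, 0)
       if st.2.1 = 100000 ∧ st.2.2 = 0 then [-1] else [st.2.1, st.2.2]) := rfl

-- Python's str.count of a single-character substring is the character count
theorem count_go_single (c : Char) (l : List Char) : ∀ (fuel acc : Nat), l.length ≤ fuel →
    PySem.Chars.count.go [c] fuel l acc = acc + l.count c := by
  induction l with
  | nil => intro fuel acc h; cases fuel <;> simp [PySem.Chars.count.go]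
  | cons h t ih =>
    intro fuel acc hf
    cases fuel with
    | zero => simp at hf
    | succ m =>
      by_cases hc : h = c
      · simp [PySem.Chars.count.go, hc, ih m (acc + 1) (by simpa using hf)]
        omega
      · simp [PySem.Chars.count.go, hc, ih m acc (by simpa using hf), Ne.symm hc]

theorem count_single (cs : List Char) (c : Char) : PySem.Chars.count cs [c] = cs.count c := by
  simp [PySem.Chars.count, count_go_single c cs cs.length 0 le_rfl]

-- A's dict-building loop is a fold over the count-filtered enumeration
theorem dictA_eq (cs : List Char) (k : Int) :
    pvDictA cs k = ((PySem.List.enumerate cs 0).filter (fun p => pvQ cs k p.2)).foldl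
      (fun d p => d.modify p.2 [] (· ++ [p.1])) PySem.Dict.empty := by
  unfold pvDictA
  rw [PySem.List.enumerate_eq_map_pyRange cs ' ', List.foldl_filter, List.foldl_map]
  simp only [count_single, pvQ, PySem.List.len_eq]
  congr 1
  funext d i
  by_cases h : k ≤ (cs.count (PySem.List.pyGetD cs i ' ') : Int) <;> simp [h]

theorem swap_foldl (L : List (Int × Char)) (e : PySem.Dict Char (List Int)) :
    L.foldl (fun d p => d.modify p.2 [] (· ++ [p.1])) e
      = (L.map Prod.swap).foldl (fun d p => d.modify p.1 [] (· ++ [p.2])) e := by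
  rw [List.foldl_map]; rfl

theorem getD_dictA (cs : List Char) (k : Int) (c : Char) :
    (pvDictA cs k).getD c []
      = (((PySem.List.enumerate cs 0).filter (fun p => pvQ cs k p.2)).filter
          (fun p => p.2 == c)).map (·.1) := by
  rw [dictA_eq, swap_foldl, PySem.Dict.getD_foldl_modify_append]
  simp [PySem.Dict.getD_empty, List.filter_map]

theorem keys_dictA (cs : List Char) (k : Int) :
    (pvDictA cs k).keys = PySem.Set.ofList (cs.filter (pvQ cs k)) := by
  rw [dictA_eq, swap_foldl]
  rw [PySem.Dict.keys_foldl_modify_key, PySem.Dict.keys_empty, PySem.Set.update_nil_left]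
  congr 1
  have : (cs.filter (pvQ cs k)) = ((PySem.List.enumerate cs 0).map (·.2)).filter (pvQ cs k) := by
    rw [PySem.List.map_snd_enumerate]
  rw [this, List.filter_map]
  simp only [List.map_map]
  rfl

theorem pvIdx_eq_filter_map (cs : List Char) (c : Char) :
    pvIdx cs c = ((PySem.List.enumerate cs 0).filter (fun p => p.2 == c)).map (·.1) := by
  unfold pvIdx pvProj
  generalize (PySem.List.enumerate cs 0) = l
  induction l with
  | nil => rfl
  | cons h t ih => by_cases hc : h.2 = c <;> simp [hc, ih]

-- for a qualifying character A's stored list is exactly B's index list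
theorem getD_dictA' (cs : List Char) (k : Int) (c : Char) (hq : pvQ cs k c = true) :
    (pvDictA cs k).getD c [] = pvIdx cs c := by
  rw [getD_dictA, pvIdx_eq_filter_map, List.filter_comm]
  congr 1
  rw [List.filter_eq_self]
  intro p hp
  simp only [List.mem_filter] at hp
  have : p.2 = c := by simpa using hp.2
  simp [pvQ] at hq ⊢
  rw [this]
  exact hq

theorem len_pvIdx (cs : List Char) (c : Char) : (pvIdx cs c).length = cs.count c := by
  rw [pvIdx_eq_filter_map, List.length_map]
  have : cs.count c = ((PySem.List.enumerate cs 0).map (·.2)).count c := by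
    rw [PySem.List.map_snd_enumerate]
  rw [← List.countP_eq_length_filter, this, List.count_eq_countP, List.countP_map]
  rfl

theorem length_win (k : Nat) (l : List Int) : (pvWin k l).length = l.length + 1 - k := by
  simp [pvWin]

theorem win_nil (k : Nat) (l : List Int) (h : l.length + 1 ≤ k) : pvWin k l = [] := by
  simp [pvWin, Nat.sub_eq_zero_of_le h]

-- A's inner loop is a pvStep-fold over the window spans
theorem innerA_eq_win (k : Int) (hk : 1 ≤ k) (lst : List Int) (p : Int × Int) :
    pvInnerA k lst p = List.foldl pvStep p (pvWin k.toNat lst) := by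
  unfold pvInnerA
  have hmap : (PySem.List.pyRange 0 ((lst.length : Int) - k + 1) 1).map
      (fun i => PySem.List.pyGetD lst (i + k - 1) 0 - PySem.List.pyGetD lst i 0 + 1)
      = pvWin k.toNat lst := by
    apply List.ext_getElem
    · simp [PySem.List.length_pyRange_one, length_win]
      omega
    · intro j hj1 hj2
      simp only [List.getElem_map, PySem.List.getElem_pyRange_one, pvWin, List.getElem_range]
      have h1 : (0 : Int) + (j : Int) + k - 1 = ((j + k.toNat - 1 : Nat) : Int) := by
        omega
      have h2 : (0 : Int) + (j : Int) = ((j : Nat) : Int) := by ring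
      rw [h1, h2, PySem.List.pyGetD_natCast, PySem.List.pyGetD_natCast]
  rw [← hmap, List.foldl_map]

theorem headD_drop (l : List Int) (n : Nat) : (l.drop n).headD 0 = l.getD n 0 := by
  rw [List.getD_eq_getElem?_getD, ← List.head?_drop]
  cases l.drop n <;> simp

-- appending one element to the queue keeps exactly the last k elements
theorem lastK_step (k : Int) (hk : 1 ≤ k) (t : List Int) (i : Int) :
    (if k < ((pvLastK k.toNat t ++ [i]).length : Int) then (pvLastK k.toNat t ++ [i]).drop 1
     else pvLastK k.toNat t ++ [i]) = pvLastK k.toNat (t ++ [i]) := by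
  unfold pvLastK
  have hlen : (t.drop (t.length - k.toNat)).length = t.length - (t.length - k.toNat) :=
    List.length_drop ..
  by_cases hle : k.toNat ≤ t.length
  · have hc : k < (((t.drop (t.length - k.toNat) ++ [i]).length : Nat) : Int) := by
      simp [hlen]; omega
    rw [if_pos hc, List.drop_append_of_le_length (by simp [hlen]; omega), List.drop_drop]
    have e1 : (t ++ [i]).length - k.toNat = t.length + 1 - k.toNat := by simp
    rw [e1, List.drop_append_of_le_length (by omega)]
    have e2 : t.length - k.toNat + 1 = t.length + 1 - k.toNat := by omega
    rw [e2]
  · have hc : ¬ k < (((t.drop (t.length - k.toNat) ++ [i]).length : Nat) : Int) := by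
      simp [hlen]; omega
    rw [if_neg hc]
    have h0 : t.length - k.toNat = 0 := by omega
    have h0' : (t ++ [i]).length - k.toNat = 0 := by simp; omega
    rw [h0, h0']
    simp

-- B's streaming fold computes the pvStep-fold of the stream of spans
theorem streamLemma (k : Int) (hk : 1 ≤ k) :
    ∀ (L : List (Int × Char)) (d : PySem.Dict Char (List Int)) (h : Char → List Int) (p : Int × Int),
    (∀ c, d.getD c [] = pvLastK k.toNat (h c)) →
    (L.foldl (pvStepB k) (d, p)).2 = List.foldl pvStep p ((pvSpanP k.toNat h L).map (·.2)) := by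
  intro L
  induction L with
  | nil => intro d h p hinv; rfl
  | cons q L ih =>
    intro d h p hinv
    obtain ⟨i, c⟩ := q
    have hlenq : (pvLastK k.toNat (h c ++ [i])).length = min k.toNat ((h c).length + 1) := by
      unfold pvLastK
      rw [List.length_drop]
      simp
      omega
    have hstep : pvStepB k (d, p) (i, c) =
        (d.insert c (pvLastK k.toNat (h c ++ [i])),
         if ((pvLastK k.toNat (h c ++ [i])).length : Int) = k then
           pvStep p (i - (pvLastK k.toNat (h c ++ [i])).headD 0 + 1)
         else p) := by
      simp only [pvStepB]
      rw [hinv c, lastK_step k hk (h c) i]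
      by_cases hcond : ((pvLastK k.toNat (h c ++ [i])).length : Int) = k <;> simp [hcond]
    have hinv' : ∀ c', (d.insert c (pvLastK k.toNat (h c ++ [i]))).getD c' []
        = pvLastK k.toNat (pvUpd h c i c') := by
      intro c'
      rw [PySem.Dict.getD_insert]
      by_cases hcc : c' = c
      · simp [hcc, pvUpd]
      · simp [hcc, pvUpd, hinv c']
    simp only [List.foldl_cons]
    rw [hstep]
    by_cases hcnt : k.toNat ≤ (h c).length + 1
    · have hcond : (((pvLastK k.toNat (h c ++ [i])).length : Nat) : Int) = k := by
        rw [hlenq]; omega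
      have hhead : (pvLastK k.toNat (h c ++ [i])).headD 0
          = (h c ++ [i]).getD ((h c).length + 1 - k.toNat) 0 := by
        unfold pvLastK
        rw [headD_drop]
        congr 1
        simp
      rw [if_pos hcond, ih _ _ _ hinv']
      simp only [pvSpanP]
      rw [if_pos hcnt, hhead]
      simp
    · have hcond : ¬ (((pvLastK k.toNat (h c ++ [i])).length : Nat) : Int) = k := by
        rw [hlenq]; omega
      rw [if_neg hcond, ih _ _ _ hinv']
      simp only [pvSpanP]
      rw [if_neg hcnt]
      simp

-- per character, the stream's spans are exactly the window spans of its occurrence list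
theorem projSpan (k : Nat) :
    ∀ (L : List (Int × Char)) (h : Char → List Int) (c : Char),
    ((pvSpanP k h L).filter (fun p => p.1 == c)).map (·.2) = pvWinExt k (h c) (pvProj L c) := by
  intro L
  induction L with
  | nil => intro h c; rfl
  | cons q L ih =>
    intro h c
    obtain ⟨i, c'⟩ := q
    by_cases hc : c' = c
    · subst hc
      by_cases hcnt : k ≤ (h c').length + 1 <;>
        simp [pvSpanP, pvWinExt, pvProj, pvUpd, hcnt, ih]
    · simp [pvSpanP, pvProj, pvUpd, hc, Ne.symm hc, ih]

theorem winExt_drop (k : Nat) (hk : 1 ≤ k) :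
    ∀ (e t : List Int), pvWinExt k t e = (pvWin k (t ++ e)).drop (t.length + 1 - k) := by
  intro e
  induction e with
  | nil =>
    intro t
    rw [List.append_nil]
    exact (List.drop_eq_nil_of_le (by rw [length_win])).symm
  | cons x e ih =>
    intro t
    show (if k ≤ t.length + 1 then [x - (t ++ [x]).getD (t.length + 1 - k) 0 + 1] else [])
        ++ pvWinExt k (t ++ [x]) e = _
    rw [ih (t ++ [x])]
    have hT : t ++ x :: e = (t ++ [x]) ++ e := by simp
    rw [hT]
    have hlen2 : (t ++ [x]).length + 1 - k = t.length + 2 - k := by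
      simp only [List.length_append, List.length_cons, List.length_nil]
    rw [hlen2]
    by_cases hle : k ≤ t.length + 1
    · rw [if_pos hle]
      have hj : t.length + 1 - k < (pvWin k ((t ++ [x]) ++ e)).length := by
        rw [length_win]; simp; omega
      rw [List.drop_eq_getElem_cons hj]
      have hj1 : t.length + 1 - k + 1 = t.length + 2 - k := by omega
      rw [hj1]
      simp only [pvWin, List.getElem_map, List.getElem_range]
      have hidx : t.length + 1 - k + k - 1 = t.length := by omega
      rw [hidx]
      have hx : ((t ++ [x]) ++ e).getD t.length 0 = x := by
        rw [List.getD_append _ _ _ _ (by simp)]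
        simp [List.getD_eq_getElem?_getD]
      have ht : ((t ++ [x]) ++ e).getD (t.length + 1 - k) 0
          = (t ++ [x]).getD (t.length + 1 - k) 0 := by
        rw [List.getD_append _ _ _ _ (by simp; omega)]
      rw [hx, ht]
      rw [List.singleton_append]
    · rw [if_neg hle]
      have h1 : t.length + 1 - k = 0 := by omega
      have h3 : t.length + 2 - k = 0 := by omega
      rw [h1, h3]
      simp

theorem winExt_nil_eq (k : Nat) (hk : 1 ≤ k) (l : List Int) : pvWinExt k [] l = pvWin k l := by
  have := winExt_drop k hk l []
  simpa [Nat.sub_eq_zero_of_le hk] using this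

theorem spanP_fst_mem (k : Nat) :
    ∀ (L : List (Int × Char)) (h : Char → List Int) (p : Char × Int),
    p ∈ pvSpanP k h L → p.1 ∈ L.map (·.2) := by
  intro L
  induction L with
  | nil => intro h p hp; simp [pvSpanP] at hp
  | cons q L ih =>
    intro h p hp
    obtain ⟨i, c⟩ := q
    simp only [pvSpanP, List.mem_append] at hp
    simp only [List.map_cons]
    rcases hp with hp | hp
    · by_cases hcnt : k ≤ (h c).length + 1
      · rw [if_pos hcnt] at hp
        simp only [List.mem_singleton] at hp
        rw [hp]
        exact List.mem_cons_self
      · rw [if_neg hcnt] at hp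
        simp at hp
    · exact List.mem_cons_of_mem _ (ih _ p hp)

-- group-by permutation: a list of keyed items is a permutation of its per-key filters
theorem grouping {β : Type} :
    ∀ (K : List Char) (L : List (Char × β)), K.Nodup → (∀ p ∈ L, p.1 ∈ K) →
    L.Perm (K.flatMap (fun c => L.filter (fun p => p.1 == c))) := by
  intro K
  induction K with
  | nil =>
    intro L hnd hmem
    cases L with
    | nil => simp
    | cons p L => exact absurd (hmem p List.mem_cons_self) (by simp)
  | cons c K ih =>
    intro L hnd hmem
    rcases List.nodup_cons.mp hnd with ⟨hcK, hndK⟩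
    have h1 : L.Perm (L.filter (fun p => p.1 == c) ++ L.filter (fun p => !(p.1 == c))) :=
      (List.filter_append_perm _ L).symm
    have h2 : (L.filter (fun p => !(p.1 == c))).Perm
        (K.flatMap (fun c' => (L.filter (fun p => !(p.1 == c))).filter (fun p => p.1 == c'))) := by
      apply ih _ hndK
      intro p hp
      have hpL := List.mem_of_mem_filter hp
      have hne : ¬ p.1 = c := by
        have := List.of_mem_filter hp
        simpa using this
      rcases List.mem_cons.mp (hmem p hpL) with h | h
      · exact absurd h hne
      · exact h
    have h3 : ∀ c' ∈ K, (L.filter (fun p => !(p.1 == c))).filter (fun p => p.1 == c')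
        = L.filter (fun p => p.1 == c') := by
      intro c' hc'
      have hne : c' ≠ c := fun h => hcK (h ▸ hc')
      rw [List.filter_filter]
      apply List.filter_congr
      intro p _
      by_cases h : p.1 = c'
      · simp [h, hne]
      · simp [h]
    refine (h1.trans (List.Perm.append_left _ h2)).trans ?_
    rw [List.flatMap_cons, List.flatMap_congr h3]

theorem pvStep_rcomm : ∀ (q : Int × Int) (a b : Int), pvStep (pvStep q a) b = pvStep (pvStep q b) a := by
  intro q a b
  simp only [pvStep, Prod.mk.injEq]
  constructor <;> split_ifs <;> omega

theorem foldl_pvStep_flatMap {α : Type} (K : List α) (f : α → List Int) (p : Int × Int) :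
    List.foldl pvStep p (K.flatMap f) = K.foldl (fun q c => List.foldl pvStep q (f c)) p := by
  induction K generalizing p with
  | nil => rfl
  | cons c K ih => simp [List.flatMap_cons, List.foldl_append, ih]

theorem add_filter {α : Type} [BEq α] [LawfulBEq α] (q : α → Bool) (acc : List α) (x : α) :
    (PySem.Set.add acc x).filter q
      = if q x then PySem.Set.add (acc.filter q) x else acc.filter q := by
  unfold PySem.Set.add
  by_cases hm : x ∈ acc <;> by_cases hq : q x <;>
    simp [hm, hq, List.filter_append, List.mem_filter]

theorem foldl_add_filter {α : Type} [BEq α] [LawfulBEq α] (q : α → Bool) :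
    ∀ (l acc : List α),
      ((l.foldl PySem.Set.add acc).filter q : List α)
        = (l.filter q).foldl PySem.Set.add (acc.filter q) := by
  intro l
  induction l with
  | nil => intro acc; rfl
  | cons x t ih =>
    intro acc
    by_cases hq : q x <;> simp [List.foldl_cons, hq, ih, add_filter]

-- ordered dedup commutes with a filter whose test depends only on the element
theorem ofList_filter {α : Type} [BEq α] [LawfulBEq α] (q : α → Bool) (l : List α) :
    (PySem.Set.ofList (l.filter q) : List α) = (PySem.Set.ofList l).filter q := by
  have := foldl_add_filter q l []
  simpa [PySem.Set.ofList, PySem.Set.empty] using this.symm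

-- both (min, max) accumulations equal the canonical per-character fold over dedup
theorem pairA_eq (cs : List Char) (k : Int) (hk : 1 ≤ k) :
    (pvDictA cs k).keys.foldl
        (fun p ch => pvInnerA k ((pvDictA cs k).getD ch []) p) (100000, 0)
      = (PySem.List.dedup cs).foldl
        (fun (p : Int × Int) c => List.foldl pvStep p (pvWin k.toNat (pvIdx cs c))) (100000, 0) := by
  rw [keys_dictA]
  have h1 : (PySem.Set.ofList (cs.filter (pvQ cs k)) : List Char).foldl
      (fun p ch => pvInnerA k ((pvDictA cs k).getD ch []) p) (100000, 0)
      = (PySem.Set.ofList (cs.filter (pvQ cs k)) : List Char).foldl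
          (fun p c => List.foldl pvStep p (pvWin k.toNat (pvIdx cs c))) (100000, 0) := by
    apply PySem.List.foldl_congr_mem
    intro acc c hc
    have hq : pvQ cs k c = true :=
      (List.mem_filter.mp ((PySem.Set.mem_ofList _ _).mp hc)).2
    rw [getD_dictA' cs k c hq, innerA_eq_win k hk]
  rw [h1, ofList_filter, List.foldl_filter]
  simp only [PySem.List.dedup_eq_ofList]
  apply PySem.List.foldl_congr_mem
  intro acc c _
  by_cases hq : pvQ cs k c = true
  · simp [hq]
  · have hcount : (pvIdx cs c).length + 1 ≤ k.toNat := by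
      rw [len_pvIdx]
      simp [pvQ] at hq
      omega
    simp [hq, win_nil k.toNat _ hcount]

theorem pairB_eq (cs : List Char) (k : Int) (hk : 1 ≤ k) :
    ((PySem.List.enumerate cs 0).foldl (pvStepB k) (PySem.Dict.empty, 100000, 0)).2
      = (PySem.List.dedup cs).foldl
        (fun (p : Int × Int) c => List.foldl pvStep p (pvWin k.toNat (pvIdx cs c))) (100000, 0) := by
  have h0 : ∀ c, (PySem.Dict.empty : PySem.Dict Char (List Int)).getD c []
      = pvLastK k.toNat ((fun _ => ([] : List Int)) c) := by
    intro c
    simp [PySem.Dict.getD_empty, pvLastK]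
  rw [streamLemma k hk _ _ _ _ h0]
  have hperm : (pvSpanP k.toNat (fun _ => []) (PySem.List.enumerate cs 0)).Perm
      ((PySem.List.dedup cs).flatMap
        (fun c => (pvSpanP k.toNat (fun _ => []) (PySem.List.enumerate cs 0)).filter
          (fun p => p.1 == c))) := by
    apply grouping _ _ (PySem.List.nodup_dedup cs)
    intro p hp
    have := spanP_fst_mem k.toNat _ _ p hp
    rw [PySem.List.map_snd_enumerate] at this
    exact (PySem.List.mem_dedup _ _).mpr this
  rw [@List.Perm.foldl_eq _ _ pvStep _ _ ⟨pvStep_rcomm⟩ (hperm.map (·.2)) (100000, 0)]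
  rw [List.map_flatMap, foldl_pvStep_flatMap]
  apply PySem.List.foldl_congr_mem
  intro acc c _
  rw [projSpan k.toNat _ _ c, winExt_nil_eq k.toNat (by omega)]
  rfl

-- the main equivalence
theorem main_eq (string : String) (k : Int) (hpre : Pre_boj_20437 string k) :
    boj_20437 string k = boj_20437_alt string k := by
  rcases hpre with hk | hempty
  · rw [portA_eq, portB_eq]
    simp only []
    rw [pairA_eq string.toList k hk, ← pairB_eq string.toList k hk]
  · subst hempty
    rw [portA_eq, portB_eq]
    have hcs : ("" : String).toList = [] := rfl
    simp only [hcs]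
    simp [pvDictA, PySem.Dict.keys_empty, PySem.List.enumerate]

-- ===== VERDICT (by name: the statement is the Claim_ definition above) =====
theorem boj_20437_spec : Claim_equal_boj_20437 := by
  intro string k _ hpre
  unfold Spec_boj_20437
  exact main_eq string k hpre
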